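-- pv_equiv track=rewrite | github.com/carozziandrea/AdventOfCode2024 | Day09/day09.py | group_contiguous_characters
-- ===== SOURCE A (Python) =====
-- def group_contiguous_characters(lst):
--     files = []
--     spaces = []
--     current_group = [lst[0]]  # Start with the first element
--
--     for i in range(1, len(lst)):
--         if lst[i] == lst[i - 1]:  # If current is the same as previous
--             current_group.append(lst[i])
--         else:  # If it's different, save the current group and start a new one
--             if current_group[0] == '.':
--                 spaces.append(current_group)
--             else:
--                 files.append(current_group)
--             current_group = [lst[i]]
--
--     # Append the last group
--     if current_group[0] == '.':
--         spaces.append(current_group)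
--     else:
--         files.append(current_group)
--     return files, spaces
-- ===== SOURCE B (Python) =====
-- def group_contiguous_characters(lst):
--     # Phase 1: chunk the list into maximal runs of equal adjacent elements.
--     runs = []
--     i = 0
--     n = len(lst)
--     while i < n:
--         j = i
--         while j < n and lst[j] == lst[i]:
--             j += 1
--         runs.append(lst[i:j])
--         i = j
--     # Phase 2: partition the runs by whether they are made of '.' characters.
--     files = [r for r in runs if r[0] != '.']
--     spaces = [r for r in runs if r[0] == '.']
--     return files, spaces
-- ===== Notes on version B (the rewrite author's own statement) =====
-- stated objective: alternative
-- what changed: B first chunks the list into maximal runs (a split-runs pass over the list itself, no index arithmetic or comparison with the previous element), then partitions the finished runs into files/spaces in a second pass, instead of A's single index loop carrying a current_group accumulator and classifying each group as it closes.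
import Mathlib
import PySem

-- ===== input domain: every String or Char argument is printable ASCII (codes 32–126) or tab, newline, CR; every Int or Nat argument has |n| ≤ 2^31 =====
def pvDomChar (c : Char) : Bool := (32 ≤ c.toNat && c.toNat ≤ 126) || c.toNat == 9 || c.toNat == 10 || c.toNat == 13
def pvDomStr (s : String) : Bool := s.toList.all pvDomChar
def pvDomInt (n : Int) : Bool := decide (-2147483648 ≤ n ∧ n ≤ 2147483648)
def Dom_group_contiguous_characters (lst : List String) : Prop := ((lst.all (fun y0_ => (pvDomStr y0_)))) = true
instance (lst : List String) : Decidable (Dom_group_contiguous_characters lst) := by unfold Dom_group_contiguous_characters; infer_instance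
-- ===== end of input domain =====

-- B chunks the list into maximal runs first and then partitions the runs in a second pass,
-- instead of A's single index loop carrying a current_group accumulator (alternative decomposition, same cost).

-- ===== PORT A =====
-- loop body of A's for-loop (state = (files, spaces, current_group))
def stepA (lst : List String) (st : List (List String) × List (List String) × List String)
    (i : Int) : List (List String) × List (List String) × List String :=
  match st with
  | (files, spaces, cur) =>
    if PySem.List.pyGetD lst i "" == PySem.List.pyGetD lst (i - 1) "" then
      (files, spaces, cur ++ [PySem.List.pyGetD lst i ""])
    else
      if PySem.List.pyGetD cur 0 "" == "." then
        (files, spaces ++ [cur], [PySem.List.pyGetD lst i ""])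
      else
        (files ++ [cur], spaces, [PySem.List.pyGetD lst i ""])

-- A's trailing "append the last group" block
def finishA (st : List (List String) × List (List String) × List String) :
    List (List String) × List (List String) :=
  match st with
  | (files, spaces, cur) =>
    if PySem.List.pyGetD cur 0 "" == "." then (files, spaces ++ [cur])
    else (files ++ [cur], spaces)

def group_contiguous_characters (lst : List String) : List (List String) × List (List String) :=
  match lst with
  | [] => ([], [])  -- lst[0] raises IndexError in Python; excluded by Pre_
  | x :: _ =>
    finishA ((PySem.List.pyRange 1 (lst.length : Int) 1).foldl (stepA lst) ([], [], [x]))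

-- ===== PORT B =====
-- phase 1 of B: chunk into maximal runs (the two nested while loops: inner scan = takeWhile/dropWhile)
def splitRuns : List String → List (List String)
  | [] => []
  | x :: xs => (x :: xs.takeWhile (· == x)) :: splitRuns (xs.dropWhile (· == x))
termination_by l => l.length
decreasing_by
  simpa using Nat.lt_succ_of_le (List.length_dropWhile_le _ _)

def group_contiguous_characters_alt (lst : List String) : List (List String) × List (List String) :=
  let runs := splitRuns lst
  (runs.filter (fun r => !(PySem.List.pyGetD r 0 "" == ".")),
   runs.filter (fun r => PySem.List.pyGetD r 0 "" == "."))

-- ===== PRECONDITION & SPEC =====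
-- Pre_ excludes only the empty list, on which A raises IndexError (lst[0]).
def Pre_group_contiguous_characters (lst : List String) : Prop := lst ≠ []
instance (lst : List String) : Decidable (Pre_group_contiguous_characters lst) := by
  unfold Pre_group_contiguous_characters; infer_instance
def pvWitness_group_contiguous_characters : List String := ["1", "1", ".", "2"]

def Spec_group_contiguous_characters (lst : List String) (out : List (List String) × List (List String)) : Prop := out = group_contiguous_characters_alt lst
instance (lst : List String) (out : List (List String) × List (List String)) : Decidable (Spec_group_contiguous_characters lst out) := by unfold Spec_group_contiguous_characters; infer_instance

-- ===== CLAIM (what is proved, stated in full; the proofs are below) =====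
def Claim_equal_group_contiguous_characters : Prop := ∀ (lst : List String), Dom_group_contiguous_characters lst → Pre_group_contiguous_characters lst → Spec_group_contiguous_characters lst (group_contiguous_characters lst)

-- ===== LEMMAS AND PROOFS =====

-- A's loop, rephrased as structural recursion on the remaining elements (prev = previous element)
def procA (prev : String) : List String → List (List String) × List (List String) × List String →
    List (List String) × List (List String)
  | [], st => finishA st
  | y :: ys, (f, s, c) =>
    if y == prev then procA y ys (f, s, c ++ [y])
    else
      if PySem.List.pyGetD c 0 "" == "." then procA y ys (f, s ++ [c], [y])
      else procA y ys (f ++ [c], s, [y])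

lemma foldA_eq (lst : List String) : ∀ (ys : List String) (k : Nat)
    (st : List (List String) × List (List String) × List String) (prev : String),
    lst.drop k = ys → 1 ≤ k → lst[k-1]? = some prev →
    finishA ((PySem.List.pyRange (k : Int) (lst.length : Int) 1).foldl (stepA lst) st) =
      procA prev ys st := by
  intro ys
  induction ys with
  | nil =>
    intro k st prev hd hk hprev
    have hlen : lst.length ≤ k := by
      by_contra h
      have := List.drop_eq_nil_iff.mp hd
      omega
    rw [PySem.List.pyRange_one_eq_nil (by exact_mod_cast hlen)]
    rfl
  | cons y ys ih =>
    intro k st prev hd hk hprev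
    have hklt : k < lst.length := by
      by_contra h
      rw [List.drop_eq_nil_iff.mpr (by omega)] at hd
      simp at hd
    have hy : lst[k]? = some y := by
      have h0 : (lst.drop k)[0]? = some y := by rw [hd]; rfl
      rw [List.getElem?_drop] at h0
      simpa using h0
    rw [PySem.List.pyRange_one_cons (by exact_mod_cast hklt), List.foldl_cons]
    have hstep : stepA lst st (k : Int) =
        (match st with
         | (f, s, c) =>
           if y == prev then (f, s, c ++ [y])
           else
             if PySem.List.pyGetD c 0 "" == "." then (f, s ++ [c], [y])
             else (f ++ [c], s, [y])) := by
      obtain ⟨f, s, c⟩ := st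
      have h1 : PySem.List.pyGetD lst (k : Int) "" = y := by
        rw [PySem.List.pyGetD_natCast]
        simp [List.getD, hy]
      have hcast : (k : Int) - 1 = ((k - 1 : Nat) : Int) := by omega
      have h2 : PySem.List.pyGetD lst ((k : Int) - 1) "" = prev := by
        rw [hcast, PySem.List.pyGetD_natCast]
        simp [List.getD, hprev]
      simp only [stepA, h1, h2]
    rw [hstep]
    have hd' : lst.drop (k + 1) = ys := by
      have : lst.drop (k + 1) = (lst.drop k).drop 1 := by
        rw [List.drop_drop]
      rw [this, hd]
      simp
    have hprev' : lst[(k+1)-1]? = some y := by simpa using hy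
    have ihk := fun st => ih (k + 1) st y hd' (by omega) hprev'
    obtain ⟨f, s, c⟩ := st
    by_cases hyp : y == prev
    · simp only [hyp, if_pos, procA]
      have := ihk (f, s, c ++ [y])
      simpa [hyp] using this
    · simp only [procA]
      by_cases hdot : PySem.List.pyGetD c 0 "" == "."
      · have := ihk (f, s ++ [c], [y])
        simp only [hyp, hdot] at *
        simpa using this
      · have := ihk (f ++ [c], s, [y])
        simp only [hyp, hdot] at *
        simpa using this

lemma takeWhile_all_append {p : String → Bool} (cs zs : List String)
    (h : ∀ b ∈ cs, p b = true) : (cs ++ zs).takeWhile p = cs ++ zs.takeWhile p := by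
  induction cs with
  | nil => simp
  | cons a cs ih =>
    simp only [List.cons_append, List.takeWhile_cons, h a (by simp)]
    rw [ih (fun b hb => h b (by simp [hb]))]
    simp

lemma dropWhile_all_append {p : String → Bool} (cs zs : List String)
    (h : ∀ b ∈ cs, p b = true) : (cs ++ zs).dropWhile p = zs.dropWhile p := by
  induction cs with
  | nil => simp
  | cons a cs ih =>
    simp only [List.cons_append, List.dropWhile_cons, h a (by simp)]
    exact ih (fun b hb => h b (by simp [hb]))

lemma splitRuns_run (a : String) (cs zs : List String) (h : ∀ b ∈ cs, b = a)
    (hz : zs = [] ∨ ∃ z zs', zs = z :: zs' ∧ (z == a) = false) :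
    splitRuns ((a :: cs) ++ zs) = (a :: cs) :: splitRuns zs := by
  have hall : ∀ b ∈ cs, (b == a) = true := fun b hb => by simp [h b hb]
  have htw : zs.takeWhile (· == a) = [] := by
    rcases hz with h0 | ⟨z, zs', rfl, hza⟩
    · simp [h0]
    · simp [hza]
  have hdw : zs.dropWhile (· == a) = zs := by
    rcases hz with h0 | ⟨z, zs', rfl, hza⟩
    · simp [h0]
    · simp [hza]
  rw [List.cons_append, splitRuns]
  rw [takeWhile_all_append cs zs hall, dropWhile_all_append cs zs hall, htw, hdw]
  simp

lemma procA_splitRuns : ∀ (ys : List String) (prev : String)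
    (f s : List (List String)) (c : List String) (a : String) (cs : List String),
    c = a :: cs → (∀ b ∈ c, b = prev) →
    procA prev ys (f, s, c) =
      (f ++ (splitRuns (c ++ ys)).filter (fun r => !(PySem.List.pyGetD r 0 "" == ".")),
       s ++ (splitRuns (c ++ ys)).filter (fun r => PySem.List.pyGetD r 0 "" == ".")) := by
  intro ys
  induction ys with
  | nil =>
    intro prev f s c a cs hc hall
    have ha : a = prev := hall a (by simp [hc])
    have hcs : ∀ b ∈ cs, b = a := fun b hb => by
      rw [ha]; exact hall b (by simp [hc, hb])
    have := splitRuns_run a cs [] hcs (Or.inl rfl)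
    simp only [List.append_nil] at this ⊢
    rw [hc, this]
    simp only [procA, finishA, splitRuns, List.filter_cons, List.filter_nil]
    by_cases had : a = "."
    · simp [had, PySem.List.pyGetD_zero_cons]
    · simp [had, PySem.List.pyGetD_zero_cons]
  | cons y ys ih =>
    intro prev f s c a cs hc hall
    have ha : a = prev := hall a (by simp [hc])
    have hcs : ∀ b ∈ cs, b = a := fun b hb => by
      rw [ha]; exact hall b (by simp [hc, hb])
    simp only [procA]
    by_cases hyp : y == prev
    · have hy : y = prev := by simpa using hyp
      have hall' : ∀ b ∈ c ++ [y], b = y := by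
        intro b hb
        rcases List.mem_append.mp hb with hb | hb
        · rw [hy]; exact hall b hb
        · simpa using hb
      have := ih y f s (c ++ [y]) a (cs ++ [y]) (by simp [hc]) hall'
      simp only [hyp, if_true] at *
      rw [this]
      simp [hc]
    · have hz : (y :: ys) = [] ∨ ∃ z zs', y :: ys = z :: zs' ∧ (z == a) = false := by
        right; exact ⟨y, ys, rfl, by rw [ha]; simpa using hyp⟩
      have hsplit : splitRuns (c ++ y :: ys) = c :: splitRuns (y :: ys) := by
        rw [hc]; exact splitRuns_run a cs (y :: ys) hcs hz
      simp only [hyp]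
      rw [hsplit, List.filter_cons, List.filter_cons]
      by_cases hdot : PySem.List.pyGetD c 0 "" == "."
      · have := ih y f (s ++ [c]) [y] y [] rfl (by simp)
        simp only [hdot, if_true] at *
        rw [this]
        simp
      · have := ih y (f ++ [c]) s [y] y [] rfl (by simp)
        simp only [hdot] at *
        rw [this]
        simp

-- ===== VERDICT (by name: the statement is the Claim_ definition above) =====
theorem group_contiguous_characters_spec : Claim_equal_group_contiguous_characters := by
  intro lst _hdom hpre
  unfold Spec_group_contiguous_characters
  cases lst with
  | nil => exact absurd rfl hpre
  | cons x xs =>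
    simp only [group_contiguous_characters]
    have h := foldA_eq (x :: xs) xs 1 ([], [], [x]) x (by simp) (by omega) (by simp)
    push_cast at h
    rw [h]
    rw [procA_splitRuns xs x [] [] [x] x [] rfl (by simp)]
    simp [group_contiguous_characters_alt]
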